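-- pv_equiv track=rewrite | github.com/clayne/TikNib | tiknib/feature/asm_const.py | _check_inst
-- ===== SOURCE A (Python) =====
-- def _check_inst(target_inst, check_list, suffixes=[]):
--     target_inst = target_inst.split("_")[0]
--     target_inst = target_inst.split(".")[0]
--     target_inst = target_inst.upper()
--     for inst in check_list:
--         if target_inst == inst:
--             return True
--         # Check conditional code
--         if target_inst.startswith(inst):
--             if len(target_inst) - len(inst) == 2:
--                 for suffix in suffixes:
--                     if target_inst == inst + suffix:
--                         return True
--     return False
-- ===== SOURCE B (Python) =====
-- def _check_inst(target_inst, check_list, suffixes=[]):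
--     t = target_inst.split("_")[0].split(".")[0].upper()
--     two = {s for s in suffixes if len(s) == 2}
--     accepted = {inst + s for inst in check_list for s in {""} | two}
--     return t in accepted
-- ===== Notes on version B (the rewrite author's own statement) =====
-- stated objective: alternative
-- what changed: Instead of scanning check_list with a startswith/length-difference guard and an inner suffix loop per instruction, B materializes the whole accepted language up front (every instruction concatenated with the empty string or with each distinct length-2 suffix) as one set and answers with a single membership test on the normalized target.
import Mathlib
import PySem

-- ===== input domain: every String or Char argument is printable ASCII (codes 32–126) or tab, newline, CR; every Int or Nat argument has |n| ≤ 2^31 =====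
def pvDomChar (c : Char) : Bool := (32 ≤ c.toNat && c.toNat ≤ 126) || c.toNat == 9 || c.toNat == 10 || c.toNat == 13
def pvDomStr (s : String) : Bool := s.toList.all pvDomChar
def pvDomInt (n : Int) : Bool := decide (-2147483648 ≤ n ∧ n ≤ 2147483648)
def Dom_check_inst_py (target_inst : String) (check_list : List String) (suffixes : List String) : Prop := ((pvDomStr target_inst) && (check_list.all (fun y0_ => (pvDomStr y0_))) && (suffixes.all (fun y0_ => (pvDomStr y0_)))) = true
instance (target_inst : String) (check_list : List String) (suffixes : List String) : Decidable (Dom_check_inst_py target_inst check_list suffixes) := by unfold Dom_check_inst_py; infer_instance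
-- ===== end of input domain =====

-- B materializes the whole accepted language (each instruction plus "" or a length-2 suffix)
-- as one set built up front and answers with a single membership test on the normalized target,
-- replacing A's startswith/length-guard scan with an inner suffix loop.

-- ===== PORT A =====
-- shared normalization (Python: target_inst.split("_")[0]; split("."); upper()).
-- split? with a non-empty separator always returns `some` of a non-empty list, so `[0]` is `headD`.
def pyNormInst (t : String) : String :=
  let t1 := ((PySem.Str.split? t "_").getD []).headD ""
  let t2 := ((PySem.Str.split? t1 ".").getD []).headD ""
  PySem.Str.upper t2

-- inner loop: 'for suffix in suffixes: if target_inst == inst + suffix: return True'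
-- (Python string concatenation/equality ported on the character lists)
def aSufLoop (t inst : String) : List String → Bool
  | [] => false
  | s :: rest =>
    if t.toList == inst.toList ++ s.toList then true else aSufLoop t inst rest

-- outer loop: 'for inst in check_list: …'
def aLoop (t : String) (suffixes : List String) : List String → Bool
  | [] => false
  | inst :: rest =>
    if t.toList == inst.toList then true
    else if PySem.Str.startswith t inst && (PySem.Str.len t - PySem.Str.len inst == (2 : Int)) then
      if aSufLoop t inst suffixes then true else aLoop t suffixes rest
    else aLoop t suffixes rest

def check_inst_py (target_inst : String) (check_list : List String) (suffixes : List String) : Bool :=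
  aLoop (pyNormInst target_inst) suffixes check_list

-- ===== PORT B =====
def check_inst_py_alt (target_inst : String) (check_list : List String) (suffixes : List String) : Bool :=
  let t := pyNormInst target_inst
  -- Python iterates the set {""} | two only to build another set (order-insensitive),
  -- so iterating its distinct-element list is exact
  let two := PySem.Set.ofList (suffixes.filter (fun s => PySem.Str.len s == (2 : Int)))
  let accepted := PySem.Set.ofList
    (check_list.flatMap (fun inst => ("" :: two).map (fun s => inst ++ s)))
  PySem.Set.contains accepted t

-- ===== PRECONDITION & SPEC =====
def Spec_check_inst_py (target_inst : String) (check_list : List String) (suffixes : List String) (out : Bool) : Prop := out = check_inst_py_alt target_inst check_list suffixes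
instance (target_inst : String) (check_list : List String) (suffixes : List String) (out : Bool) : Decidable (Spec_check_inst_py target_inst check_list suffixes out) := by unfold Spec_check_inst_py; infer_instance

-- ===== CLAIM (what is proved, stated in full; the proofs are below) =====
def Claim_equal_check_inst_py : Prop := ∀ (target_inst : String) (check_list : List String) (suffixes : List String), Dom_check_inst_py target_inst check_list suffixes → Spec_check_inst_py target_inst check_list suffixes (check_inst_py target_inst check_list suffixes)

-- ===== LEMMAS AND PROOFS =====

-- the common meaning of both programs
def Hit (t : String) (suffixes check_list : List String) : Prop :=
  t ∈ check_list ∨ ∃ inst ∈ check_list, ∃ s ∈ suffixes,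
    s.toList.length = 2 ∧ t.toList = inst.toList ++ s.toList

lemma aSufLoop_iff (t inst : String) (sfx : List String) :
    aSufLoop t inst sfx = true ↔ ∃ s ∈ sfx, t.toList = inst.toList ++ s.toList := by
  induction sfx with
  | nil => simp [aSufLoop]
  | cons s rest ih =>
    by_cases h : t.toList = inst.toList ++ s.toList
    · simp [aSufLoop, h]
    · simp [aSufLoop, h, ih]

lemma aLoop_iff (t : String) (sfx cl : List String) :
    aLoop t sfx cl = true ↔ Hit t sfx cl := by
  induction cl with
  | nil => simp [aLoop, Hit]
  | cons inst rest ih =>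
    by_cases he : t = inst
    · subst he
      simp [aLoop, Hit]
    · have he' : t.toList ≠ inst.toList := fun h => he (String.toList_inj.mp h)
      by_cases hg : PySem.Str.startswith t inst = true ∧
          PySem.Str.len t - PySem.Str.len inst = (2 : Int)
      · -- guard holds
        have : (PySem.Str.startswith t inst && (PySem.Str.len t - PySem.Str.len inst == (2 : Int))) = true := by
          rw [Bool.and_eq_true]
          refine ⟨hg.1, ?_⟩
          simpa [PySem.Str.len_eq] using hg.2
        simp only [aLoop, this, if_true]
        rw [show (if (t.toList == inst.toList) = true then true
              else if aSufLoop t inst sfx = true then true else aLoop t sfx rest) =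
            (if aSufLoop t inst sfx = true then true else aLoop t sfx rest) from by simp [he']]
        by_cases hs : aSufLoop t inst sfx = true
        · -- any suffix matching under the guard has length 2
          obtain ⟨s, hsmem, hseq⟩ := (aSufLoop_iff t inst sfx).mp hs
          have hlen : s.toList.length = 2 := by
            have h2 := hg.2
            rw [PySem.Str.len_eq, PySem.Str.len_eq, hseq, List.length_append] at h2
            omega
          simp only [hs, if_true]
          constructor
          · intro _
            exact Or.inr ⟨inst, List.mem_cons_self, s, hsmem, hlen, hseq⟩
          · intro _; trivial
        · simp only [hs, Bool.false_eq_true, ite_false, ih, Hit]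
          constructor
          · rintro (h | ⟨i, hi, s, hsm, hl, he2⟩)
            · exact Or.inl (List.mem_cons_of_mem _ h)
            · exact Or.inr ⟨i, List.mem_cons_of_mem _ hi, s, hsm, hl, he2⟩
          · rintro (h | ⟨i, hi, s, hsm, hl, he2⟩)
            · rcases List.mem_cons.mp h with h | h
              · exact absurd h he
              · exact Or.inl h
            · rcases List.mem_cons.mp hi with h | h
              · subst h
                exact absurd ((aSufLoop_iff t i sfx).mpr ⟨s, hsm, he2⟩) hs
              · exact Or.inr ⟨i, h, s, hsm, hl, he2⟩
      · -- guard fails: no suffix of length 2 can match inst either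
        have hnomatch : ∀ s ∈ sfx, s.toList.length = 2 → t.toList ≠ inst.toList ++ s.toList := by
          intro s _ hl he2
          apply hg
          constructor
          · rw [PySem.Str.startswith_eq, PySem.Chars.startswith_iff, he2]
            exact List.prefix_append _ _
          · rw [PySem.Str.len_eq, PySem.Str.len_eq, he2, List.length_append]
            omega
        have hgb : (PySem.Str.startswith t inst && (PySem.Str.len t - PySem.Str.len inst == (2 : Int))) = false := by
          rw [Bool.and_eq_false_iff]
          by_cases h1 : PySem.Str.startswith t inst = true
          · right
            exact beq_eq_false_iff_ne.mpr (fun hh => hg ⟨h1, hh⟩)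
          · left
            exact Bool.eq_false_iff.mpr h1
        simp only [aLoop, he', beq_iff_eq, hgb, Bool.false_eq_true, ite_false, ih, Hit]
        constructor
        · rintro (h | ⟨i, hi, s, hsm, hl, he2⟩)
          · exact Or.inl (List.mem_cons_of_mem _ h)
          · exact Or.inr ⟨i, List.mem_cons_of_mem _ hi, s, hsm, hl, he2⟩
        · rintro (h | ⟨i, hi, s, hsm, hl, he2⟩)
          · rcases List.mem_cons.mp h with h | h
            · exact absurd h he
            · exact Or.inl h
          · rcases List.mem_cons.mp hi with h | h
            · subst h
              exact absurd he2 (hnomatch s hsm hl)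
            · exact Or.inr ⟨i, h, s, hsm, hl, he2⟩

lemma alt_iff (t : String) (sfx cl : List String) :
    check_inst_py_alt t cl sfx = true ↔ Hit (pyNormInst t) sfx cl := by
  unfold check_inst_py_alt Hit
  set u := pyNormInst t with hu
  simp only [PySem.Set.contains_iff, PySem.Set.mem_ofList, List.mem_flatMap, List.mem_map,
    List.mem_cons, List.mem_filter, beq_iff_eq, PySem.Str.len_eq]
  constructor
  · rintro ⟨inst, hinst, s, hs, heq⟩
    rcases hs with rfl | ⟨hsm, hslen⟩
    · left
      have : u = inst := by
        rw [← heq]; apply String.toList_inj.mp; simp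
      rw [this]; exact hinst
    · right
      have hl2 : s.toList.length = 2 := by
        have := hslen; omega
      exact ⟨inst, hinst, s, hsm, hl2, by rw [← heq]; simp⟩
  · rintro (h | ⟨inst, hinst, s, hsm, hl, he⟩)
    · exact ⟨u, h, "", Or.inl rfl, by simp⟩
    · refine ⟨inst, hinst, s, Or.inr ⟨hsm, by omega⟩, ?_⟩
      apply String.toList_inj.mp
      simpa using he.symm

-- ===== VERDICT (by name: the statement is the Claim_ definition above) =====
theorem check_inst_py_spec : Claim_equal_check_inst_py := by
  intro t cl sfx _
  unfold Spec_check_inst_py check_inst_py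
  rw [Bool.eq_iff_iff, aLoop_iff, alt_iff]
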